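-- pv_equiv track=rewrite | github.com/amitlisha/HexaGen | larc/dsl.py | get_corner
-- ===== SOURCE A (Python) =====
-- def _to_indices(patch):
--     """Strip colors from an Object (dict) → set of keys; pass-through if already a set."""
--     if isinstance(patch, dict):
--         return set(patch.keys())
--     return patch
--
-- def get_corner(patch, position='upper_left'):
--     """
--     One corner (row, col) of the patch's bounding box.
--     position: 'upper_left', 'upper_right', 'lower_left', 'lower_right'.
--     Patch must be non-empty.
--     """
--     idxs = _to_indices(patch)
--     rows = [i for i, j in idxs]
--     cols = [j for i, j in idxs]
--     row_fn = {'upper_left': min, 'upper_right': min,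
--               'lower_left': max, 'lower_right': max}
--     col_fn = {'upper_left': min, 'upper_right': max,
--               'lower_left': min, 'lower_right': max}
--     return (row_fn[position](rows), col_fn[position](cols))
-- ===== SOURCE B (Python) =====
-- def _to_indices(patch):
--     """Strip colors from an Object (dict) -> set of keys; pass-through if already a set."""
--     if isinstance(patch, dict):
--         return set(patch.keys())
--     return patch
--
-- def get_corner(patch, position='upper_left'):
--     """Single pass over the indices keeping four running extremes, then a table lookup."""
--     idxs = list(_to_indices(patch))
--     if not idxs:
--         raise ValueError('get_corner: empty patch')
--     (min_r, min_c) = (max_r, max_c) = idxs[0]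
--     for r, c in idxs[1:]:
--         min_r = min(min_r, r)
--         max_r = max(max_r, r)
--         min_c = min(min_c, c)
--         max_c = max(max_c, c)
--     corners = {'upper_left': (min_r, min_c), 'upper_right': (min_r, max_c),
--                'lower_left': (max_r, min_c), 'lower_right': (max_r, max_c)}
--     return corners[position]
-- ===== Notes on version B (the rewrite author's own statement) =====
-- stated objective: alternative
-- what changed: Replaces the two comprehensions plus two dicts of min/max functions by a single pass over the indices maintaining four running extremes, followed by one table lookup of the corner pair.
import Mathlib
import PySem

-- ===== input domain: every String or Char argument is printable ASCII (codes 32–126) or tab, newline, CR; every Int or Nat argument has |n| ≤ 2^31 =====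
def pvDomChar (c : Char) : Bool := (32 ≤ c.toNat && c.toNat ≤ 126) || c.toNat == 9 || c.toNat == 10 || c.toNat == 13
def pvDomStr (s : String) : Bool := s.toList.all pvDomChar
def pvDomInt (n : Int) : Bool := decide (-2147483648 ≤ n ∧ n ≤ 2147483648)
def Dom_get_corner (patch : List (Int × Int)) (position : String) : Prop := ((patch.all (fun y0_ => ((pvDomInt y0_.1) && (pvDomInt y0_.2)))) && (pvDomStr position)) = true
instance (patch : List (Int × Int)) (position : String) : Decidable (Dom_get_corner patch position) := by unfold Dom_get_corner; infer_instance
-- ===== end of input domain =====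

-- B: single pass keeping four running extremes + one corner-table lookup, instead of
-- two projection comprehensions and two dicts of min/max functions (alternative decomposition, same cost).


-- ===== PORT A =====
-- _to_indices is the identity on a set of indices (the Lean type already is the index list)
def get_corner (patch : List (Int × Int)) (position : String) : Int × Int :=
  let idxs := patch
  let rows := idxs.map (fun i => i.1)
  let cols := idxs.map (fun i => i.2)
  let row_fn : PySem.Dict String (List Int → Option Int) :=
    PySem.Dict.ofList [("upper_left", fun l => PySem.List.min? l (fun y => y)),
                       ("upper_right", fun l => PySem.List.min? l (fun y => y)),
                       ("lower_left", fun l => PySem.List.max? l (fun y => y)),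
                       ("lower_right", fun l => PySem.List.max? l (fun y => y))]
  let col_fn : PySem.Dict String (List Int → Option Int) :=
    PySem.Dict.ofList [("upper_left", fun l => PySem.List.min? l (fun y => y)),
                       ("upper_right", fun l => PySem.List.max? l (fun y => y)),
                       ("lower_left", fun l => PySem.List.min? l (fun y => y)),
                       ("lower_right", fun l => PySem.List.max? l (fun y => y))]
  match row_fn.get? position, col_fn.get? position with
  | some f, some g => ((f rows).getD 0, (g cols).getD 0)   -- (f rows) = none is min/max on [] = ValueError, outside Pre_
  | _, _ => (0, 0)                                          -- KeyError on an unknown position, outside Pre_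

-- ===== PORT B =====
def get_corner_alt (patch : List (Int × Int)) (position : String) : Int × Int :=
  match patch with
  | [] => (0, 0)   -- Python B raises ValueError here, outside Pre_
  | (r0, c0) :: rest =>
    let s := rest.foldl
      (fun (s : Int × Int × Int × Int) p =>
        (min s.1 p.1, max s.2.1 p.1, min s.2.2.1 p.2, max s.2.2.2 p.2))
      (r0, r0, c0, c0)
    let corners : PySem.Dict String (Int × Int) :=
      PySem.Dict.ofList [("upper_left", (s.1, s.2.2.1)), ("upper_right", (s.1, s.2.2.2)),
                         ("lower_left", (s.2.1, s.2.2.1)), ("lower_right", (s.2.1, s.2.2.2))]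
    (corners.get? position).getD (0, 0)   -- none = KeyError, outside Pre_

-- ===== PRECONDITION & SPEC =====
-- Pre_ excludes exactly the inputs where A raises: ValueError (min/max of an empty patch) and KeyError (unknown position).
def Pre_get_corner (patch : List (Int × Int)) (position : String) : Prop :=
  patch ≠ [] ∧ position ∈ ["upper_left", "upper_right", "lower_left", "lower_right"]
instance (patch : List (Int × Int)) (position : String) : Decidable (Pre_get_corner patch position) := by unfold Pre_get_corner; infer_instance
def pvWitness_get_corner : (List (Int × Int)) × String := ([(1, 2), (3, 0)], "lower_left")
def Spec_get_corner (patch : List (Int × Int)) (position : String) (out : Int × Int) : Prop := out = get_corner_alt patch position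
instance (patch : List (Int × Int)) (position : String) (out : Int × Int) : Decidable (Spec_get_corner patch position out) := by unfold Spec_get_corner; infer_instance

-- ===== CLAIM (what is proved, stated in full; the proofs are below) =====
def Claim_equal_get_corner : Prop := ∀ (patch : List (Int × Int)) (position : String), Dom_get_corner patch position → Pre_get_corner patch position → Spec_get_corner patch position (get_corner patch position)

-- ===== LEMMAS AND PROOFS =====
-- B's single fold computes the four separate running extremes of the projections.
theorem fold4_eq (rest : List (Int × Int)) (a b c d : Int) :
    rest.foldl
      (fun (s : Int × Int × Int × Int) p =>
        (min s.1 p.1, max s.2.1 p.1, min s.2.2.1 p.2, max s.2.2.2 p.2))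
      (a, b, c, d)
    = ((rest.map (fun i => i.1)).foldl min a,
       (rest.map (fun i => i.1)).foldl max b,
       (rest.map (fun i => i.2)).foldl min c,
       (rest.map (fun i => i.2)).foldl max d) := by
  induction rest generalizing a b c d with
  | nil => rfl
  | cons p t ih => simp [List.foldl_cons, ih]

-- ===== VERDICT (by name: the statement is the Claim_ definition above) =====
theorem get_corner_spec : Claim_equal_get_corner := by
  intro patch position _ hpre
  obtain ⟨hne, hpos⟩ := hpre
  obtain ⟨⟨r0, c0⟩, rest, rfl⟩ : ∃ x t, patch = x :: t := by
    cases patch with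
    | nil => exact absurd rfl hne
    | cons x t => exact ⟨x, t, rfl⟩
  unfold Spec_get_corner get_corner get_corner_alt
  simp only [List.mem_cons, List.not_mem_nil, or_false] at hpos
  rcases hpos with rfl | rfl | rfl | rfl <;>
    simp [PySem.Dict.ofList, PySem.Dict.update, PySem.Dict.empty, PySem.Dict.insert, PySem.Dict.get?, PySem.List.min?_id_cons, PySem.List.max?_id_cons, fold4_eq]
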